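-- pv_equiv track=rewrite | github.com/MScudeller/advent-of-code | advent-of-code-2023/day11.py | prepare_map
-- ===== SOURCE A (Python) =====
-- def prepare_map(inp: str, qty: int):
--     foo = qty - 1
--     input_map = [[(c, 1) for c in list(line)] for line in inp.splitlines()]
--     for i in range(len(input_map))[::-1]:
--         if all([c == "." for c, _ in input_map[i]]):
--             for f in input_map[i]:
--                 input_map.pop(i)
--                 input_map.insert(i, [(".", qty)] * len(input_map[i]))
--
--     for j in range(len(input_map[0]))[::-1]:
--         column = [input_map[i][j] for i in range(len(input_map))]
--         if all([c == "." for c, _ in column]):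
--             for i in range(len(input_map)):
--                 input_map[i].pop(j)
--                 input_map[i].insert(j, (".", qty))
--
--     return input_map
-- ===== SOURCE B (Python) =====
-- def prepare_map(inp: str, qty: int):
--     lines = inp.splitlines()
--     width = len(lines[0]) if lines else 0
--     empty_col = [all(line[j] == "." for line in lines) for j in range(width)]
--     out = []
--     for line in lines:
--         empty_row = all(c == "." for c in line)
--         out.append([(".", qty) if empty_row or empty_col[j] else (line[j], 1)
--                     for j in range(width)])
--     return out
-- ===== Notes on version B (the rewrite author's own statement) =====
-- stated objective: simpler
-- what changed: B precomputes the empty-column flags once and builds the whole grid functionally in a single pass over the lines, instead of A's in-place pop/insert mutation loops (a pop+insert per cell of every empty row, and a column extraction plus per-row pop/insert per column index); Pre_ restricts to the natural domain: non-empty rectangular grids whose last line is not an all-dots non-empty line (outside it A raises IndexError, or on ragged grids whose first line is shortest A returns rows of accidental mixed widths taken from neighbour lines).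
-- outside the precondition, e.g. on prepare_map('a\nbc', 3): A returns [[('a', 1)], [('b', 1), ('c', 1)]], B returns [[('a', 1)], [('b', 1)]]
import Mathlib
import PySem

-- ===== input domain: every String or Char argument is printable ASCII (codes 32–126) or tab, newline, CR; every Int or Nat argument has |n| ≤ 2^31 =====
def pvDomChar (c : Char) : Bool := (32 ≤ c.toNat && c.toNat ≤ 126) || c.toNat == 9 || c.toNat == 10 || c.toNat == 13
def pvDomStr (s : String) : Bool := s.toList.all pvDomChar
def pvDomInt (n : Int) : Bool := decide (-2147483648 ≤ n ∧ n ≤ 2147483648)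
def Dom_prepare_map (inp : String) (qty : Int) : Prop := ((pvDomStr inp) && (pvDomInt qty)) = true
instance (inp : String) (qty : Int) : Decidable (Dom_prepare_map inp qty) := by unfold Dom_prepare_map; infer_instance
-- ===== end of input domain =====

-- B replaces A's in-place pop/insert mutation loops by one precomputed empty-column table and a
-- single functional pass over the lines (objective: simpler).

-- ===== PORT A =====
def pvA_parseRow (line : List Char) : List (String × Int) :=
  line.map (fun c => (String.ofList [c], (1 : Int)))

def pvA_rowStep (qty : Int) (m : List (List (String × Int))) (i : Int) :
    List (List (String × Int)) :=
  match PySem.List.pop? m i with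
  | none => m
  | some (_, m1) =>
    match PySem.List.pyGet? m1 i with
    | none => m1
    | some row => PySem.List.insert m1 i (List.replicate row.length (".", qty))

def pvA_rowBody (qty : Int) (m : List (List (String × Int))) (i : Int) :
    List (List (String × Int)) :=
  if (((PySem.List.pyGetD m i []).map (fun cw => cw.1 == ".")).all (fun b => b)) then
    (PySem.List.pyGetD m i []).foldl (fun mm _ => pvA_rowStep qty mm i) m
  else m



def pvA_colStep (qty : Int) (mm : List (List (String × Int))) (i j : Int) :
    List (List (String × Int)) :=
  match PySem.List.pop? (PySem.List.pyGetD mm i []) j with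
  | none => mm
  | some (_, r) => PySem.List.pySetD mm i (PySem.List.insert r j (".", qty))

def pvA_colBody (qty : Int) (m : List (List (String × Int))) (j : Int) :
    List (List (String × Int)) :=
  if ((((PySem.List.pyRange 0 (m.length : Int) 1).map
        (fun i => PySem.List.pyGetD (PySem.List.pyGetD m i []) j ("", 0))).map
          (fun cw => cw.1 == ".")).all (fun b => b)) then
    (PySem.List.pyRange 0 (m.length : Int) 1).foldl (fun mm i => pvA_colStep qty mm i j) m
  else m

def prepare_map (inp : String) (qty : Int) : List (List (String × Int)) :=
  let _foo := qty - 1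
  -- input_map = [[(c, 1) for c in list(line)] for line in inp.splitlines()]
  let input_map := (PySem.Str.splitlines inp).map (fun line => pvA_parseRow line.toList)
  -- for i in range(len(input_map))[::-1]:   ([::-1] is reverse)
  let m1 := ((PySem.List.pyRange 0 (input_map.length : Int) 1).reverse).foldl (pvA_rowBody qty) input_map
  -- for j in range(len(input_map[0]))[::-1]:   (input_map[0] raises IndexError on an empty map, excluded by Pre_)
  ((PySem.List.pyRange 0 (((PySem.List.pyGetD m1 0 []).length : Nat) : Int) 1).reverse).foldl (pvA_colBody qty) m1

-- ===== PORT B =====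
def prepare_map_alt (inp : String) (qty : Int) : List (List (String × Int)) :=
  let lines := (PySem.Str.splitlines inp).map String.toList
  -- width = len(lines[0]) if lines else 0
  let width := (lines.headD []).length
  -- empty_col = [all(line[j] == "." for line in lines) for j in range(width)]
  -- (line[j] raises IndexError on a too-short line, excluded by Pre_)
  let empty_col := (List.range width).map (fun j => lines.all (fun line => line.getD j ' ' == '.'))
  lines.map (fun line =>
    (List.range width).map (fun j =>
      if line.all (fun c => c == '.') || empty_col.getD j false then (("." : String), qty)
      else (String.ofList [line.getD j ' '], (1 : Int))))

-- ===== PRECONDITION & SPEC =====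
-- Pre_ restricts to the natural domain of the puzzle: a non-empty rectangular grid whose last line
-- is not a non-empty all-dots line.  Outside it A either raises IndexError (empty input, all-dots
-- non-empty last line, ragged grids with a long first line) or, on ragged grids whose first line is
-- shortest, returns rows of accidental mixed widths copied from neighbouring lines.
def Pre_prepare_map (inp : String) (qty : Int) : Prop :=
  let L := (PySem.Str.splitlines inp).map String.toList
  L ≠ [] ∧ L.all (fun r => r.length == (L.headD []).length) = true ∧
    ¬ (L.getLastD [] ≠ [] ∧ (L.getLastD []).all (fun c => c == '.') = true)
instance (inp : String) (qty : Int) : Decidable (Pre_prepare_map inp qty) := by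
  unfold Pre_prepare_map; infer_instance

def pvWitness_prepare_map : String × Int := ("#.\n#.", 2)

def Spec_prepare_map (inp : String) (qty : Int) (out : List (List (String × Int))) : Prop := out = prepare_map_alt inp qty
instance (inp : String) (qty : Int) (out : List (List (String × Int))) : Decidable (Spec_prepare_map inp qty out) := by unfold Spec_prepare_map; infer_instance

-- ===== CLAIM (what is proved, stated in full; the proofs are below) =====
def Claim_equal_prepare_map : Prop := ∀ (inp : String) (qty : Int), Dom_prepare_map inp qty → Pre_prepare_map inp qty → Spec_prepare_map inp qty (prepare_map inp qty)

-- ===== LEMMAS AND PROOFS =====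

def pvT1 (qty : Int) (w : Nat) (line : List Char) : List (String × Int) :=
  if line.all (fun c => c == '.') then List.replicate w ((".":String), qty) else pvA_parseRow line

def pvLoopDown {M : Type} (f : M → Nat → M) : Nat → M → M
  | 0, m => m
  | t + 1, m => pvLoopDown f t (f m t)

theorem erase_insert_set {α : Type} (m : List α) (t : Nat) (v : α) (h : t < m.length) :
    PySem.List.insert (m.eraseIdx t) (t : Int) v = m.set t v := by
  rw [PySem.List.insert_natCast _ _ _ (by simp [List.length_eraseIdx, h]; omega)]
  rw [List.eraseIdx_eq_take_drop_succ]
  have ht : (List.take t m).length = t := by simp; omega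
  rw [List.take_left' ht, List.drop_left' ht]
  rw [List.set_eq_take_append_cons_drop, if_pos h]

theorem rowStep_set (qty : Int) (mm : List (List (String × Int))) (t : Nat) (h : t + 1 < mm.length) :
    pvA_rowStep qty mm (t : Int)
      = mm.set t (List.replicate (mm.getD (t+1) []).length (".", qty)) := by
  have hlt : t < mm.length := by omega
  have h1 : t < (mm.eraseIdx t).length := by simp [List.length_eraseIdx, hlt]; omega
  unfold pvA_rowStep
  rw [PySem.List.pop?_natCast mm t hlt]
  dsimp only
  rw [PySem.List.pyGet?_natCast, List.getElem?_eq_getElem h1]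
  dsimp only
  rw [List.getElem_eraseIdx, dif_neg (by omega)]
  rw [erase_insert_set _ _ _ hlt]
  rw [List.getD_eq_getElem _ _ h]

theorem getD_set_ne {α : Type} (m : List α) (t k : Nat) (R : α) (d : α) (h : t ≠ k) :
    (m.set t R).getD k d = m.getD k d := by
  simp [List.getD, List.getElem?_set_ne h]

theorem row_inner {β : Type} (qty : Int) (t w : Nat) (L : List β) (hL : L ≠ [])
    (m : List (List (String × Int))) (h : t + 1 < m.length)
    (hw : (m.getD (t+1) []).length = w) :
    L.foldl (fun mm _ => pvA_rowStep qty mm (t : Int)) m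
      = m.set t (List.replicate w (".", qty)) := by
  have haux : ∀ (L' : List β),
      L'.foldl (fun mm _ => pvA_rowStep qty mm (t : Int)) (m.set t (List.replicate w (".", qty)))
        = m.set t (List.replicate w (".", qty)) := by
    intro L'
    induction L' with
    | nil => rfl
    | cons x L' ih =>
      rw [List.foldl_cons]
      rw [rowStep_set qty _ t (by simpa using h)]
      rw [getD_set_ne _ _ _ _ _ (by omega), hw, List.set_set]
      exact ih
  cases L with
  | nil => exact absurd rfl hL
  | cons x L' =>
    rw [List.foldl_cons, rowStep_set qty m t h, hw]
    exact haux L'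

theorem parse_dots (r : List Char) :
    ((pvA_parseRow r).map (fun cw => cw.1 == ".")).all (fun b => b)
      = r.all (fun c => c == '.') := by
  unfold pvA_parseRow
  simp only [List.map_map, List.all_map]
  refine List.all_congr rfl ?_
  intro c
  show (String.ofList [c] == ".") = (c == '.')
  rcases hh : (c == '.') with _ | _
  · simp_all
    intro hc
    exact hh (by simpa using congrArg String.toList hc)
  · simp_all

theorem getD_append_cons {α : Type} (P S : List α) (x d : α) (t : Nat) (h : P.length = t) :
    (P ++ x :: S).getD t d = x := by
  subst h; simp [List.getD]

theorem set_append_cons {α : Type} (P S : List α) (x v : α) (t : Nat) (h : P.length = t) :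
    (P ++ x :: S).set t v = P ++ v :: S := by
  subst h; simp

theorem getLastD_eq_getElem (rows : List (List Char)) (h : 0 < rows.length) :
    rows.getLastD [] = rows[rows.length - 1] := by
  cases rows with
  | nil => simp at h
  | cons r rs =>
    rw [List.getLastD_eq_getLast?, List.getLast?_eq_getElem?]
    simp
    rfl

theorem lenT1 (qty : Int) (w : Nat) (r : List Char) (h : r.length = w) :
    (pvT1 qty w r).length = w := by
  unfold pvT1
  split <;> simp [pvA_parseRow, h]

theorem rowPhase (qty : Int) (rows : List (List Char)) (w : Nat)
    (h2 : ∀ r ∈ rows, r.length = w)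
    (h3 : ¬ (rows.getLastD [] ≠ [] ∧ ∀ c ∈ rows.getLastD [], c = '.')) :
    ∀ t, t ≤ rows.length →
      pvLoopDown (fun mm k => pvA_rowBody qty mm (k : Int)) t
        ((rows.take t).map pvA_parseRow ++ (rows.drop t).map (pvT1 qty w))
        = rows.map (pvT1 qty w) := by
  intro t
  induction t with
  | zero => intro _; simp [pvLoopDown]
  | succ t ih =>
    intro hle
    have ht : t < rows.length := by omega
    rw [pvLoopDown]
    have hm : (rows.take (t+1)).map pvA_parseRow ++ (rows.drop (t+1)).map (pvT1 qty w)
        = (rows.take t).map pvA_parseRow ++ pvA_parseRow rows[t] :: (rows.drop (t+1)).map (pvT1 qty w) := by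
      rw [List.take_add_one, List.getElem?_eq_getElem ht]
      simp only [Option.toList_some, List.map_append, List.map_cons, List.map_nil,
        List.append_assoc, List.cons_append, List.nil_append]
    have hP : ((rows.take t).map pvA_parseRow).length = t := by
      simp [List.length_take]; omega
    have hbody : pvA_rowBody qty ((rows.take (t+1)).map pvA_parseRow ++ (rows.drop (t+1)).map (pvT1 qty w)) (t : Int)
        = (rows.take t).map pvA_parseRow ++ (rows.drop t).map (pvT1 qty w) := by
      unfold pvA_rowBody
      rw [hm, PySem.List.pyGetD_natCast, getD_append_cons _ _ _ _ _ hP]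
      rw [parse_dots]
      rw [List.drop_eq_getElem_cons ht, List.map_cons]
      rcases hd : rows[t].all (fun c => c == '.') with _ | _
      · rw [if_neg (by simp)]
        have : pvT1 qty w rows[t] = pvA_parseRow rows[t] := by unfold pvT1; rw [hd]; simp
        rw [this]
      · rw [if_pos rfl]
        have hwt : rows[t].length = w := h2 _ (List.getElem_mem ht)
        have hT1 : pvT1 qty w rows[t] = List.replicate w ((".":String), qty) := by
          unfold pvT1; rw [hd]; simp
        rcases Nat.eq_zero_or_pos w with hw0 | hwpos
        · have hnil : rows[t] = [] := List.eq_nil_of_length_eq_zero (by omega)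
          rw [hT1, hw0, hnil]
          simp [pvA_parseRow]
        · have htn : t + 1 < rows.length := by
            rcases Nat.lt_or_ge (t+1) rows.length with h | h
            · exact h
            · exfalso
              apply h3
              have hlast : rows.getLastD [] = rows[t] := by
                rw [getLastD_eq_getElem rows (by omega)]
                congr 1
                omega
              rw [hlast]
              constructor
              · intro hnil; rw [hnil] at hwt; simp at hwt; omega
              · intro c hc
                have := List.all_eq_true.mp hd c hc
                simpa using this
          have hx : pvA_parseRow rows[t] ≠ [] := by
            unfold pvA_parseRow
            intro hc
            have := congrArg List.length hc
            simp [hwt] at this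
            omega
          rw [row_inner qty t w _ hx _ ?h ?hw]
          case h =>
            simp [List.length_take]
            omega
          case hw =>
            have hsplit : ((rows.take t).map pvA_parseRow ++ pvA_parseRow rows[t] :: (rows.drop (t+1)).map (pvT1 qty w))
                = ((rows.take t).map pvA_parseRow ++ [pvA_parseRow rows[t]]) ++ (rows.drop (t+1)).map (pvT1 qty w) := by
              simp
            rw [hsplit]
            rw [List.drop_eq_getElem_cons htn, List.map_cons]
            rw [getD_append_cons _ _ _ _ (t+1) (by simp [List.length_take]; omega)]
            exact lenT1 qty w _ (h2 _ (List.getElem_mem htn))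
          rw [set_append_cons _ _ _ _ _ hP, hT1]
    rw [hbody]
    exact ih (by omega)

def pvColD (rows : List (List Char)) (j : Nat) : Bool :=
  rows.all (fun r => r.getD j ' ' == '.')

def pvG (qty : Int) (r : List Char) (j : Nat) : String × Int :=
  if r.all (fun c => c == '.') then ((".":String), qty) else (String.ofList [r.getD j ' '], 1)

def pvMix (qty : Int) (rows : List (List Char)) (w t : Nat) (r : List Char) : List (String × Int) :=
  (List.range w).map (fun j => if t ≤ j ∧ pvColD rows j = true then ((".":String), qty) else pvG qty r j)

theorem ofList_singleton_beq (c : Char) : (String.ofList [c] == ".") = (c == '.') := by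
  rcases hh : (c == '.') with _ | _
  · simp_all
    intro hc
    exact hh (by simpa using congrArg String.toList hc)
  · simp_all

theorem set_range_map {β : Type} (w t : Nat) (f : Nat → β) (v : β) :
    ((List.range w).map f).set t v = (List.range w).map (fun j => if j = t then v else f j) := by
  apply List.ext_getElem
  · simp
  · intro j h1 h2
    have hj : j < w := by simpa using h1
    rw [List.getElem_set, List.getElem_map, List.getElem_map, List.getElem_range]
    by_cases hjt : j = t
    · simp [hjt]
    · rw [if_neg (by omega), if_neg hjt]

theorem colStep_set (qty : Int) (mm : List (List (String × Int))) (k t : Nat)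
    (h : t < (mm.getD k []).length) :
    pvA_colStep qty mm (k : Int) (t : Int) = mm.set k ((mm.getD k []).set t ((".":String), qty)) := by
  unfold pvA_colStep
  rw [PySem.List.pyGetD_natCast]
  rw [PySem.List.pop?_natCast _ t h]
  dsimp only
  rw [erase_insert_set _ _ _ h]
  rw [PySem.List.pySetD_natCast]

theorem col_update (qty : Int) (t : Nat) :
    ∀ (suf pref : List (List (String × Int))), (∀ r ∈ suf, t < r.length) →
      (List.range' pref.length suf.length).foldl (fun mm (k : Nat) => pvA_colStep qty mm (k : Int) (t : Int))
          (pref ++ suf)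
        = pref ++ suf.map (fun r => r.set t ((".":String), qty)) := by
  intro suf
  induction suf with
  | nil => intro pref _; simp
  | cons x s ih =>
    intro pref hs
    rw [List.length_cons, List.range'_succ, List.foldl_cons]
    have hstep : pvA_colStep qty (pref ++ x :: s) (pref.length : Int) (t : Int)
        = pref ++ x.set t ((".":String), qty) :: s := by
      rw [colStep_set qty _ _ _ (by rw [getD_append_cons _ _ _ _ _ rfl]; exact hs x List.mem_cons_self)]
      rw [getD_append_cons _ _ _ _ _ rfl, set_append_cons _ _ _ _ _ rfl]
    rw [hstep]
    have := ih (pref ++ [x.set t ((".":String), qty)]) (fun r hr => hs r (List.mem_cons_of_mem _ hr))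
    simpa using this

theorem all_range_eq_all {α : Type} (l : List α) (p : α → Bool) (q : Nat → Bool)
    (hq : ∀ k (hk : k < l.length), q k = p l[k]) :
    (List.range l.length).all q = l.all p := by
  rw [Bool.eq_iff_iff, List.all_eq_true, List.all_eq_true]
  constructor
  · intro h a ha
    obtain ⟨k, hk, rfl⟩ := List.mem_iff_getElem.mp ha
    rw [← hq k hk]
    exact h k (List.mem_range.mpr hk)
  · intro h k hk
    have hk' := List.mem_range.mp hk
    rw [hq k hk']
    exact h _ (List.getElem_mem hk')

theorem mix_succ_eq (qty : Int) (rows : List (List Char)) (w t : Nat) (r : List Char)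
    (hcol : pvColD rows t = false) :
    pvMix qty rows w (t+1) r = pvMix qty rows w t r := by
  unfold pvMix
  apply List.map_congr_left
  intro j hj
  by_cases hjt : j = t
  · subst hjt
    rw [if_neg (by rintro ⟨_, hc⟩; rw [hcol] at hc; exact absurd hc (by simp)),
        if_neg (by rintro ⟨_, hc⟩; rw [hcol] at hc; exact absurd hc (by simp))]
  · have hiff : (t+1 ≤ j ∧ pvColD rows j = true) ↔ (t ≤ j ∧ pvColD rows j = true) := by
      constructor <;> (rintro ⟨ha, hb⟩; exact ⟨by omega, hb⟩)
    rw [if_congr hiff rfl rfl]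

theorem set_mix_succ (qty : Int) (rows : List (List Char)) (w t : Nat) (r : List Char)
    (ht : t < w) (hcol : pvColD rows t = true) :
    (pvMix qty rows w (t+1) r).set t ((".":String), qty) = pvMix qty rows w t r := by
  unfold pvMix
  rw [set_range_map w t _ _]
  apply List.map_congr_left
  intro j hj
  by_cases hjt : j = t
  · subst hjt
    rw [if_pos rfl, if_pos ⟨le_refl _, hcol⟩]
  · rw [if_neg hjt]
    have hiff : (t+1 ≤ j ∧ pvColD rows j = true) ↔ (t ≤ j ∧ pvColD rows j = true) := by
      constructor <;> (rintro ⟨ha, hb⟩; exact ⟨by omega, hb⟩)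
    rw [if_congr hiff rfl rfl]

theorem colBody_mix (qty : Int) (rows : List (List Char)) (w t : Nat)
    (h2 : ∀ r ∈ rows, r.length = w) (ht : t < w) :
    pvA_colBody qty (rows.map (pvMix qty rows w (t+1))) (t : Int)
      = rows.map (pvMix qty rows w t) := by
  unfold pvA_colBody
  rw [List.length_map, PySem.List.pyRange_zero_natCast]
  simp only [List.map_map, List.all_map, Function.comp_def, PySem.List.pyGetD_natCast]
  have hcond : (List.range rows.length).all
      (fun k => ((((rows.map (pvMix qty rows w (t+1))).getD k []).getD t (("":String), (0:Int))).1 == "."))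
      = pvColD rows t := by
    unfold pvColD
    apply all_range_eq_all
    intro k hk
    have hget : (rows.map (pvMix qty rows w (t+1))).getD k [] = pvMix qty rows w (t+1) rows[k] := by
      rw [List.getD_eq_getElem _ _ (by simpa using hk), List.getElem_map]
    rw [hget]
    have hmixget : (pvMix qty rows w (t+1) rows[k]).getD t (("":String), (0:Int)) = pvG qty rows[k] t := by
      unfold pvMix
      rw [PySem.List.getD_map_range _ _ _ _ ht]
      rw [if_neg (by rintro ⟨hc, _⟩; omega)]
    rw [hmixget]
    unfold pvG
    rcases hd : rows[k].all (fun c => c == '.') with _ | _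
    · rw [if_neg (by simp)]
      exact ofList_singleton_beq _
    · rw [if_pos rfl]
      have hw : rows[k].length = w := h2 _ (List.getElem_mem hk)
      have htk : t < rows[k].length := by omega
      rw [List.getD_eq_getElem _ _ htk]
      have := List.all_eq_true.mp hd _ (List.getElem_mem htk)
      have hdot : rows[k][t] = '.' := by simpa using this
      rw [hdot]
      rfl
  rw [hcond]
  rcases hcol : pvColD rows t with _ | _
  · rw [if_neg (by simp)]
    apply List.map_congr_left
    intro r _
    exact mix_succ_eq qty rows w t r hcol
  · rw [if_pos rfl]
    rw [List.foldl_map, List.range_eq_range']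
    have hupd := col_update qty t (rows.map (pvMix qty rows w (t+1))) []
      (by
        intro r hr
        obtain ⟨r', _, rfl⟩ := List.mem_map.mp hr
        unfold pvMix
        simp [ht])
    simp only [List.length_nil, List.nil_append] at hupd
    rw [List.length_map] at hupd
    rw [hupd, List.map_map]
    apply List.map_congr_left
    intro r _
    exact set_mix_succ qty rows w t r ht hcol

theorem map_eq_range_map {α β : Type} (r : List α) (f : α → β) (d : α) :
    r.map f = (List.range r.length).map (fun j => f (r.getD j d)) := by
  apply List.ext_getElem
  · simp
  · intro j h1 h2
    have hj : j < r.length := by simpa using h1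
    simp [List.getElem?_eq_getElem hj]

theorem colPhase (qty : Int) (rows : List (List Char)) (w : Nat)
    (h2 : ∀ r ∈ rows, r.length = w) :
    ∀ t, t ≤ w →
      pvLoopDown (fun mm k => pvA_colBody qty mm (k : Int)) t (rows.map (pvMix qty rows w t))
        = rows.map (pvMix qty rows w 0) := by
  intro t
  induction t with
  | zero => intro _; rfl
  | succ t ih =>
    intro hle
    rw [pvLoopDown, colBody_mix qty rows w t h2 (by omega)]
    exact ih (by omega)

theorem T1_eq_mix_w (qty : Int) (rows : List (List Char)) (w : Nat) (r : List Char)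
    (h : r.length = w) :
    pvT1 qty w r = pvMix qty rows w w r := by
  unfold pvMix
  have hcg : ∀ j ∈ List.range w,
      (if w ≤ j ∧ pvColD rows j = true then ((".":String), qty) else pvG qty r j) = pvG qty r j := by
    intro j hj
    rw [if_neg (by rintro ⟨hc, _⟩; have := List.mem_range.mp hj; omega)]
  rw [List.map_congr_left hcg]
  unfold pvT1 pvG
  rcases hd : r.all (fun c => c == '.') with _ | _
  · simp only [Bool.false_eq_true, if_false]
    rw [show pvA_parseRow r = (List.range r.length).map (fun j => (String.ofList [r.getD j ' '], (1:Int))) from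
      by unfold pvA_parseRow; exact map_eq_range_map r _ ' ']
    rw [h]
  · simp only [if_true]
    rw [show (List.range w).map (fun _ => ((".":String), qty)) = List.replicate (List.range w).length ((".":String), qty) from List.map_const']
    rw [List.length_range]

theorem foldl_range_reverse {M : Type} (f : M → Nat → M) :
    ∀ (n : Nat) (m : M), ((List.range n).reverse).foldl f m = pvLoopDown f n m := by
  intro n
  induction n with
  | zero => intro m; rfl
  | succ n ih =>
    intro m
    rw [List.range_succ, List.reverse_append]
    simpa [pvLoopDown] using ih (f m n)

theorem pyfold_down {M : Type} (f : M → Int → M) (n : Nat) (m : M) :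
    ((PySem.List.pyRange 0 (n : Int) 1).reverse).foldl f m
      = pvLoopDown (fun mm k => f mm (k : Int)) n m := by
  rw [PySem.List.pyRange_zero_natCast, ← List.map_reverse, List.foldl_map, foldl_range_reverse]

def pvM1 (rows : List (List Char)) (qty : Int) : List (List (String × Int)) :=
  ((PySem.List.pyRange 0 ((rows.map pvA_parseRow).length : Int) 1).reverse).foldl
    (pvA_rowBody qty) (rows.map pvA_parseRow)

def pvAgrid (rows : List (List Char)) (qty : Int) : List (List (String × Int)) :=
  ((PySem.List.pyRange 0 (((PySem.List.pyGetD (pvM1 rows qty) 0 []).length : Nat) : Int) 1).reverse).foldl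
    (pvA_colBody qty) (pvM1 rows qty)

def pvBgrid (rows : List (List Char)) (qty : Int) : List (List (String × Int)) :=
  rows.map (fun line =>
    (List.range (rows.headD []).length).map (fun j =>
      if line.all (fun c => c == '.')
          || ((List.range (rows.headD []).length).map
                (fun j => rows.all (fun line => line.getD j ' ' == '.'))).getD j false
        then (("." : String), qty)
        else (String.ofList [line.getD j ' '], (1 : Int))))

theorem core (rows : List (List Char)) (qty : Int)
    (h1 : rows ≠ [])
    (h2 : ∀ r ∈ rows, r.length = (rows.headD []).length)
    (h3 : ¬ (rows.getLastD [] ≠ [] ∧ ∀ c ∈ rows.getLastD [], c = '.')) :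
    pvAgrid rows qty = pvBgrid rows qty := by
  obtain ⟨r0, rs, rfl⟩ : ∃ r0 rs, rows = r0 :: rs := by
    cases rows with
    | nil => exact absurd rfl h1
    | cons r0 rs => exact ⟨r0, rs, rfl⟩
  have hw : ((r0 :: rs).headD []).length = r0.length := by simp
  rw [hw] at h2
  have hM1 : pvM1 (r0 :: rs) qty = (r0 :: rs).map (pvT1 qty r0.length) := by
    unfold pvM1
    rw [List.length_map, pyfold_down]
    have := rowPhase qty (r0 :: rs) r0.length h2 h3 (r0 :: rs).length (le_refl _)
    simpa using this
  have hw0 : (PySem.List.pyGetD (pvM1 (r0 :: rs) qty) 0 []).length = r0.length := by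
    rw [hM1]
    rw [show ((0:Int)) = ((0:Nat):Int) from rfl, PySem.List.pyGetD_natCast]
    simp only [List.map_cons, List.getD_cons_zero]
    exact lenT1 qty _ _ rfl
  unfold pvAgrid
  rw [hw0, hM1, pyfold_down]
  have hmixw : (r0 :: rs).map (pvT1 qty r0.length)
      = (r0 :: rs).map (pvMix qty (r0 :: rs) r0.length r0.length) :=
    List.map_congr_left (fun r hr => T1_eq_mix_w qty (r0 :: rs) r0.length r (h2 r hr))
  rw [hmixw, colPhase qty (r0 :: rs) r0.length h2 r0.length (le_refl _)]
  unfold pvBgrid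
  rw [hw]
  apply List.map_congr_left
  intro r _
  unfold pvMix
  apply List.map_congr_left
  intro j hj
  have hjw : j < r0.length := List.mem_range.mp hj
  rw [PySem.List.getD_map_range _ _ _ _ hjw]
  have h0j : (0 ≤ j ∧ pvColD (r0 :: rs) j = true) ↔ (pvColD (r0 :: rs) j = true) := by
    constructor
    · rintro ⟨_, hb⟩; exact hb
    · intro hb; exact ⟨Nat.zero_le _, hb⟩
  rw [if_congr h0j rfl rfl]
  unfold pvG pvColD
  rcases hcol : (r0 :: rs).all (fun line => line.getD j ' ' == '.') with _ | _
    <;> rcases hrow : r.all (fun c => c == '.') with _ | _ <;> simp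

theorem prepare_map_eq_Agrid (inp : String) (qty : Int) :
    prepare_map inp qty = pvAgrid ((PySem.Str.splitlines inp).map String.toList) qty := by
  unfold prepare_map pvAgrid pvM1
  rw [List.map_map]
  rfl

theorem prepare_map_alt_eq_Bgrid (inp : String) (qty : Int) :
    prepare_map_alt inp qty = pvBgrid ((PySem.Str.splitlines inp).map String.toList) qty := rfl

-- ===== VERDICT (by name: the statement is the Claim_ definition above) =====
theorem prepare_map_spec : Claim_equal_prepare_map := by
  intro inp qty _hdom hpre
  obtain ⟨h1, h2, h3⟩ := hpre
  unfold Spec_prepare_map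
  rw [prepare_map_eq_Agrid, prepare_map_alt_eq_Bgrid]
  refine core ((PySem.Str.splitlines inp).map String.toList) qty h1 ?_ ?_
  · intro r hr
    simpa using List.all_eq_true.mp h2 r hr
  · rintro ⟨hne, hall⟩
    exact h3 ⟨hne, List.all_eq_true.mpr (fun c hc => by simpa using hall c hc)⟩
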